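-- pv_equiv track=rewrite | github.com/akashkolakkal/eyrc23_GG_1470 | Stage 2/Task 5/pathfinder.py | convert_directions
-- ===== SOURCE A (Python) =====
-- def convert_directions(direction_dict, facing):
--     def not_a_node(node):
--         return (node[0] == 0 or node[1] == 1 or node[1] == 3 or node == (4,4))
--
--     relative_directions = {
--         'U': {'U': 'F', 'R': 'R', 'D': 'B', 'L': 'L'},
--         'R': {'U': 'L', 'R': 'F', 'D': 'R', 'L': 'B'},
--         'D': {'U': 'B', 'R': 'L', 'D': 'F', 'L': 'R'},
--         'L': {'U': 'R', 'R': 'B', 'D': 'L', 'L': 'F'},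
--     }
--     current_direction = facing
--
--     path = list(direction_dict.keys())
--     directions = list(direction_dict.values())
--     all_directions = []
--     relative_instructions = []
--
--     for i in range(len(path)):
--         all_directions.append(relative_directions[current_direction][directions[i]])
--         current_direction = directions[i]
--
--     for i in range(len(path)):
--         if not_a_node(path[i])   and i != 0:
--             continue
--         else:
--             relative_instructions.append(all_directions[i])
--
--
--     return relative_instructions, current_direction
-- ===== SOURCE B (Python) =====
-- def convert_directions(direction_dict, facing):
--     def turn(cur, d):
--         return "FRBL"[("URDL".index(d) - "URDL".index(cur)) % 4]
--
--     def go(cur, items):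
--         if not items:
--             return [], cur
--         (node, d) = items[0]
--         instrs, final = go(d, items[1:])
--         if not (node[0] == 0 or node[1] == 1 or node[1] == 3 or node == (4, 4)):
--             instrs = [turn(cur, d)] + instrs
--         return instrs, final
--
--     items = list(direction_dict.items())
--     if not items:
--         return [], facing
--     (node0, d0) = items[0]
--     instrs, final = go(d0, items[1:])
--     return [turn(facing, d0)] + instrs, final
-- ===== Notes on version B (the rewrite author's own statement) =====
-- stated objective: alternative
-- what changed: B discards A's nested 4x4 lookup table and its two staged index loops over parallel path/directions arrays, and instead builds the result back-to-front by a recursion over the items: the recursive call handles the tail (filtering non-nodes), each level conses its turn computed as "FRBL"[("URDL".index(next)-"URDL".index(cur)) % 4], and the always-kept first item is handled once at the top level.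
import Mathlib
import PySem

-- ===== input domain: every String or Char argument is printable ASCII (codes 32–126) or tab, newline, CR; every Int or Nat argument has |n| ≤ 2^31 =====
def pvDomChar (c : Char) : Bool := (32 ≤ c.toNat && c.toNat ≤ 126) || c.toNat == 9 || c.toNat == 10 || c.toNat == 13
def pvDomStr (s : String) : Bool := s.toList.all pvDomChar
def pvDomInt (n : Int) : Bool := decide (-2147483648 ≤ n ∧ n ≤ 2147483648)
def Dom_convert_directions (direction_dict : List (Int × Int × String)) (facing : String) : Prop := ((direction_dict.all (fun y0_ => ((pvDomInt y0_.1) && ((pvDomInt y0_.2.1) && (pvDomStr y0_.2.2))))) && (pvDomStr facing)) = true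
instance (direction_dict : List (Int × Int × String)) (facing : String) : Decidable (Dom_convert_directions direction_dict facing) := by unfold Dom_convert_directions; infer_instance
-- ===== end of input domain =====

-- B replaces A's nested 4x4 turn table and two index loops with a back-to-front recursion
-- over the items that conses each kept turn, computed as "FRBL"[("URDL".index(d)-"URDL".index(cur)) % 4] (alternative decomposition).


-- ===== PORT A =====
def pvNotANode (node : Int × Int) : Bool :=
  node.1 == 0 || node.2 == 1 || node.2 == 3 || node == ((4 : Int), (4 : Int))

def pvRelDirections : List (String × List (String × String)) :=
  [("U", [("U", "F"), ("R", "R"), ("D", "B"), ("L", "L")]),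
   ("R", [("U", "L"), ("R", "F"), ("D", "R"), ("L", "B")]),
   ("D", [("U", "B"), ("R", "L"), ("D", "F"), ("L", "R")]),
   ("L", [("U", "R"), ("R", "B"), ("D", "L"), ("L", "F")])]

-- relative_directions[cur][d]; the .getD "" arms are the KeyError cases, excluded by Pre_
def pvRelLookup (cur d : String) : String :=
  (((pvRelDirections.lookup cur).getD []).lookup d).getD ""

def convert_directions (direction_dict : List (Int × Int × String)) (facing : String) : List String × String :=
  let path := direction_dict.map (fun e => (e.1, e.2.1))
  let directions := direction_dict.map (fun e => e.2.2)
  let st := (PySem.List.pyRange 0 (PySem.List.len path)).foldl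
      (fun (st : List String × String) i =>
        (st.1 ++ [pvRelLookup st.2 (PySem.List.pyGetD directions i "")],
         PySem.List.pyGetD directions i ""))
      ([], facing)
  let all_directions := st.1
  let current_direction := st.2
  let relative_instructions := (PySem.List.pyRange 0 (PySem.List.len path)).foldl
      (fun (acc : List String) i =>
        if pvNotANode (PySem.List.pyGetD path i ((0 : Int), (0 : Int))) && !(i == 0) then acc
        else acc ++ [PySem.List.pyGetD all_directions i ""])
      []
  (relative_instructions, current_direction)

-- ===== PORT B =====
-- "URDL".index(cur): PySem.Str.find's -1 arm is the ValueError case, excluded by Pre_;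
-- "FRBL"[k]: the .getD "" arm is unreachable since 0 ≤ k % 4 < 4
def pvTurn (cur d : String) : String :=
  ((PySem.Str.pyGet? "FRBL"
    (PySem.Int.mod (PySem.Str.find "URDL" d - PySem.Str.find "URDL" cur) 4)).map
      (fun c => String.ofList [c])).getD ""

-- Source B's inner 'go': back-to-front recursion returning (instructions of the tail, final direction)
def pvGoB (cur : String) : List (Int × Int × String) → List String × String
  | [] => ([], cur)
  | e :: es =>
      let r := pvGoB e.2.2 es
      (if pvNotANode (e.1, e.2.1) then r.1 else pvTurn cur e.2.2 :: r.1, r.2)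

def convert_directions_alt (direction_dict : List (Int × Int × String)) (facing : String) : List String × String :=
  match direction_dict with
  | [] => ([], facing)
  | e :: es =>
      let r := pvGoB e.2.2 es
      (pvTurn facing e.2.2 :: r.1, r.2)

-- ===== PRECONDITION & SPEC =====
-- Pre_ excludes exactly the inputs on which A raises KeyError (and B raises ValueError):
-- a stored direction outside 'U','R','D','L', or a nonempty dictionary with such a facing.
def Pre_convert_directions (direction_dict : List (Int × Int × String)) (facing : String) : Prop :=
  (direction_dict = [] ∨ facing ∈ (["U", "R", "D", "L"] : List String)) ∧
  (∀ e ∈ direction_dict, e.2.2 ∈ (["U", "R", "D", "L"] : List String))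

instance (direction_dict : List (Int × Int × String)) (facing : String) : Decidable (Pre_convert_directions direction_dict facing) := by
  unfold Pre_convert_directions; infer_instance

def pvWitness_convert_directions : (List (Int × Int × String)) × String := ([(1, 2, "U"), (2, 2, "R")], "U")

def Spec_convert_directions (direction_dict : List (Int × Int × String)) (facing : String) (out : List String × String) : Prop := out = convert_directions_alt direction_dict facing
instance (direction_dict : List (Int × Int × String)) (facing : String) (out : List String × String) : Decidable (Spec_convert_directions direction_dict facing out) := by unfold Spec_convert_directions; infer_instance

-- ===== CLAIM (what is proved, stated in full; the proofs are below) =====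
def Claim_equal_convert_directions : Prop := ∀ (direction_dict : List (Int × Int × String)) (facing : String), Dom_convert_directions direction_dict facing → Pre_convert_directions direction_dict facing → Spec_convert_directions direction_dict facing (convert_directions direction_dict facing)

-- ===== LEMMAS AND PROOFS =====

-- the successive turns of A's first loop, and the final direction
def pvTurns (cur : String) : List String → List String
  | [] => []
  | d :: ds => pvRelLookup cur d :: pvTurns d ds

def pvFin (cur : String) : List String → String
  | [] => cur
  | d :: ds => pvFin d ds

-- structural recursion matching A's result after the first entry
def pvGoA (cur : String) : List (Int × Int × String) → List String × String
  | [] => ([], cur)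
  | e :: es =>
      let r := pvGoA e.2.2 es
      (if pvNotANode (e.1, e.2.1) then r.1 else pvRelLookup cur e.2.2 :: r.1, r.2)

theorem pvTurn_eq (cur d : String) (hc : cur ∈ (["U", "R", "D", "L"] : List String))
    (hd : d ∈ (["U", "R", "D", "L"] : List String)) : pvRelLookup cur d = pvTurn cur d := by
  fin_cases hc <;> fin_cases hd <;> decide

theorem pvTurns_length (cur : String) (ds : List String) : (pvTurns cur ds).length = ds.length := by
  induction ds generalizing cur with
  | nil => rfl
  | cons d ds ih => simp [pvTurns, ih]

theorem pvGoA_eq_pvGoB (es : List (Int × Int × String)) (cur : String)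
    (hc : cur ∈ (["U", "R", "D", "L"] : List String))
    (hes : ∀ e ∈ es, e.2.2 ∈ (["U", "R", "D", "L"] : List String)) :
    pvGoA cur es = pvGoB cur es := by
  induction es generalizing cur with
  | nil => rfl
  | cons e es ih =>
      have he : e.2.2 ∈ (["U", "R", "D", "L"] : List String) := hes e (by simp)
      simp only [pvGoA, pvGoB, ih e.2.2 he (fun x hx => hes x (by simp [hx])),
        pvTurn_eq cur e.2.2 hc he]

-- A's first loop, characterised
theorem pvFoldA1 (ds : List String) (acc : List String) (cur : String) :
    ds.foldl (fun (st : List String × String) d => (st.1 ++ [pvRelLookup st.2 d], d)) (acc, cur)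
      = (acc ++ pvTurns cur ds, pvFin cur ds) := by
  induction ds generalizing acc cur with
  | nil => simp [pvTurns, pvFin]
  | cons d ds ih => simp [List.foldl_cons, ih, pvTurns, pvFin]

theorem pvZipFilter (es : List (Int × Int × String)) (cur : String) :
    (((es.map (fun e => (e.1, e.2.1))).zip (pvTurns cur (es.map (fun e => e.2.2)))).filter
        (fun q => !pvNotANode q.1)).map (fun q => q.2) = (pvGoA cur es).1 := by
  induction es generalizing cur with
  | nil => rfl
  | cons e es ih =>
      simp only [List.map_cons, pvTurns, List.zip_cons_cons, List.filter_cons, pvGoA]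
      by_cases h : pvNotANode (e.1, e.2.1) = true
      · simp [h, ih]
      · simp [h, ih]

theorem pvFin_eq_goA (es : List (Int × Int × String)) (cur : String) :
    pvFin cur (es.map (fun e => e.2.2)) = (pvGoA cur es).2 := by
  induction es generalizing cur with
  | nil => rfl
  | cons e es ih => simp [pvFin, pvGoA, ih]

theorem pvA_cons (e : Int × Int × String) (es : List (Int × Int × String)) (facing : String) :
    convert_directions (e :: es) facing
      = (pvRelLookup facing e.2.2 :: (pvGoA e.2.2 es).1, (pvGoA e.2.2 es).2) := by
  have hlen1 : PySem.List.len ((e :: es).map (fun e => (e.1, e.2.1)))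
      = PySem.List.len ((e :: es).map (fun e => e.2.2)) := by
    simp [PySem.List.len_eq]
  simp only [convert_directions]
  rw [hlen1, PySem.List.foldl_pyRange_zero_pyGetD ((e :: es).map (fun e => e.2.2)) ""
      (fun (st : List String × String) d => (st.1 ++ [pvRelLookup st.2 d], d)) ([], facing)]
  rw [pvFoldA1]
  simp only [List.nil_append, List.map_cons, pvTurns, pvFin]
  rw [PySem.List.len_eq]
  simp only [List.length_cons, List.length_map]
  rw [PySem.List.pyRange_one_cons (by exact_mod_cast Nat.succ_pos es.length)]
  simp only [List.foldl_cons]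
  have h0 : PySem.List.pyGetD (pvRelLookup facing e.2.2 :: pvTurns e.2.2 (es.map (fun e => e.2.2))) 0 ""
      = pvRelLookup facing e.2.2 := by
    simp [PySem.List.pyGetD, PySem.List.pyGet?, PySem.List.pyIdx?]
  simp only [show ((0 : Int) == 0) = true from rfl, Bool.not_true, Bool.and_false,
    Bool.false_eq_true, if_false, List.nil_append, h0, show (0 : Int) + 1 = 1 from rfl]
  rw [PySem.List.foldl_congr_mem _ _
      (fun (acc : List String) i =>
        if pvNotANode (PySem.List.pyGetD ((e.1, e.2.1) :: List.map (fun e => (e.1, e.2.1)) es) i (0, 0))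
          then acc
          else acc ++ [PySem.List.pyGetD (pvRelLookup facing e.2.2 ::
                 pvTurns e.2.2 (List.map (fun e => e.2.2) es)) i ""]) _
      (by
        intro acc i hi
        have h1 : (1 : Int) ≤ i := (PySem.List.mem_pyRange_one.mp hi).1
        have h2 : (i == 0) = false := by simp; omega
        simp [h2])]
  rw [← List.foldl_map
      (f := fun i => (PySem.List.pyGetD ((e.1, e.2.1) :: List.map (fun e => (e.1, e.2.1)) es) i (0, 0),
        PySem.List.pyGetD (pvRelLookup facing e.2.2 :: pvTurns e.2.2 (List.map (fun e => e.2.2) es)) i ""))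
      (g := fun (acc : List String) (q : (Int × Int) × String) =>
        if pvNotANode q.1 then acc else acc ++ [q.2])]
  rw [← List.zip_map']
  have hb1 : ((es.length + 1 : Nat) : Int)
      = (((e.1, e.2.1) :: List.map (fun e => (e.1, e.2.1)) es).length : Int) := by simp
  rw [hb1, PySem.List.map_pyGetD_pyRange' _ _ (by norm_num : (0 : Int) ≤ 1)]
  have hb2 : ((((e.1, e.2.1) :: List.map (fun e => (e.1, e.2.1)) es).length : Nat) : Int)
      = ((pvRelLookup facing e.2.2 :: pvTurns e.2.2 (List.map (fun e => e.2.2) es)).length : Int) := by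
    simp [pvTurns_length]
  rw [hb2, PySem.List.map_pyGetD_pyRange' _ _ (by norm_num : (0 : Int) ≤ 1)]
  simp only [show ((1 : Int)).toNat = 1 from rfl, List.drop_succ_cons, List.drop_zero]
  rw [PySem.List.foldl_congr_mem _ _
      (fun (acc : List String) (q : (Int × Int) × String) =>
        if !pvNotANode q.1 then acc ++ [q.2] else acc) _
      (by intro acc q _; by_cases h : pvNotANode q.1 = true <;> simp [h])]
  rw [PySem.List.foldl_append_if, pvZipFilter]
  simp [pvFin_eq_goA]

-- ===== VERDICT (by name: the statement is the Claim_ definition above) =====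
theorem convert_directions_spec : Claim_equal_convert_directions := by
  intro dd facing _ hpre
  unfold Spec_convert_directions
  obtain ⟨hf, hds⟩ := hpre
  cases dd with
  | nil => rfl
  | cons e es =>
      have hf' : facing ∈ (["U", "R", "D", "L"] : List String) := hf.resolve_left (by simp)
      have he : e.2.2 ∈ (["U", "R", "D", "L"] : List String) := hds e (by simp)
      rw [pvA_cons]
      show _ = (pvTurn facing e.2.2 :: (pvGoB e.2.2 es).1, (pvGoB e.2.2 es).2)
      rw [pvTurn_eq facing e.2.2 hf' he,
        pvGoA_eq_pvGoB es e.2.2 he (fun x hx => hds x (by simp [hx]))]
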